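-- pv_equiv track=rewrite | github.com/HeartSleep/w13scan | W13SCAN/lib/core/spiderset.py | etl
-- ===== SOURCE A (Python) =====
-- Chars = [',', '-', '_']
--
-- def etl(str, onlyNUM=False):
--     '''
--     传入一个字符串，将里面的字母转化为A，数字转化为N，特殊符号转换为T，其他符号或者字符转化成C
--     :param str:
--     :param onlyNUM:只换数字
--     :return:
--     '''
--     if not str:
--         return ""
--
--     str_lower = str.lower()
--     chars = []
--
--     if not onlyNUM:
--         for c in str_lower:
--             if 'a' <= c <= 'z':
--                 chars.append('A')
--             elif '0' <= c <= '9':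
--                 chars.append('N')
--             elif c in Chars:
--                 chars.append('T')
--             else:
--                 chars.append('C')
--     else:
--         for c in str_lower:
--             if '0' <= c <= '9':
--                 chars.append('N')
--             else:
--                 chars.append(c)
--
--     return ''.join(chars)
-- ===== SOURCE B (Python) =====
-- # Staged global-substitution rewrite: instead of one per-character branch chain,
-- # apply successive global str.replace passes (letters->A, digits->N, ,-_->T),
-- # then a final catch-all pass turning everything that is not A/N/T into C.
-- Chars = [',', '-', '_']
--
--
-- def etl(str, onlyNUM=False):
--     if not str:
--         return ""
--     s = str.lower()
--     if onlyNUM: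
--         for d in '0123456789':
--             s = s.replace(d, 'N')
--         return s
--     for ch in 'abcdefghijklmnopqrstuvwxyz':
--         s = s.replace(ch, 'A')
--     for d in '0123456789':
--         s = s.replace(d, 'N')
--     for t in ',-_':
--         s = s.replace(t, 'T')
--     return ''.join(c if c in 'ANT' else 'C' for c in s)
-- ===== Notes on version B (the rewrite author's own statement) =====
-- stated objective: alternative
-- what changed: A's single per-character loop with a four-way branch chain is replaced by staged global substitution passes: successive str.replace sweeps map letters to A, digits to N and ,-_ to T, and one final catch-all pass turns every remaining non-A/N/T character into C (correct because lowercasing first removes any uppercase A/N/T, so earlier passes' output is never re-matched).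
import Mathlib
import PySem

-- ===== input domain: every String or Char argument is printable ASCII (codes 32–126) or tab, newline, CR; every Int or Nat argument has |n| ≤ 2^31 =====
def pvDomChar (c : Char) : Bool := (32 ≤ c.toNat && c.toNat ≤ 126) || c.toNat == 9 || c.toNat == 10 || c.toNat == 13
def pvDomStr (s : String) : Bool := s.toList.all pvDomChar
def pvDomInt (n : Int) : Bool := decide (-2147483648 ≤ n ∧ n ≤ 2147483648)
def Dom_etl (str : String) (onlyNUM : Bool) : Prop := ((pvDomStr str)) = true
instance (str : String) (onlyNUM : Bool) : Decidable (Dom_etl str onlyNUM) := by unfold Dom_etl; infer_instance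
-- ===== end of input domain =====

-- B replaces A's single per-character four-way branch loop by staged global
-- str.replace substitution passes plus one final catch-all pass (objective: alternative).

-- ===== PORT A =====
def etl (str : String) (onlyNUM : Bool) : String :=
  if str = "" then ""
  else
    let str_lower := PySem.Str.lower str
    let chars : List Char :=
      if !onlyNUM then
        str_lower.toList.foldl (fun acc c =>
          if 'a' ≤ c ∧ c ≤ 'z' then acc ++ ['A']
          else if '0' ≤ c ∧ c ≤ '9' then acc ++ ['N']
          else if c ∈ [',', '-', '_'] then acc ++ ['T']
          else acc ++ ['C']) []
      else
        str_lower.toList.foldl (fun acc c =>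
          if '0' ≤ c ∧ c ≤ '9' then acc ++ ['N'] else acc ++ [c]) []
    String.ofList chars

-- ===== PORT B =====
def etl_alt (str : String) (onlyNUM : Bool) : String :=
  if str = "" then ""
  else
    let s := PySem.Str.lower str
    if onlyNUM then
      "0123456789".toList.foldl
        (fun s d => PySem.Str.replace s (String.ofList [d]) "N") s
    else
      let s := "abcdefghijklmnopqrstuvwxyz".toList.foldl
        (fun s ch => PySem.Str.replace s (String.ofList [ch]) "A") s
      let s := "0123456789".toList.foldl
        (fun s d => PySem.Str.replace s (String.ofList [d]) "N") s
      let s := ",-_".toList.foldl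
        (fun s t => PySem.Str.replace s (String.ofList [t]) "T") s
      String.ofList (s.toList.map (fun c => if c ∈ ['A', 'N', 'T'] then c else 'C'))

-- ===== PRECONDITION & SPEC =====
def Spec_etl (str : String) (onlyNUM : Bool) (out : String) : Prop := out = etl_alt str onlyNUM
instance (str : String) (onlyNUM : Bool) (out : String) : Decidable (Spec_etl str onlyNUM out) := by unfold Spec_etl; infer_instance

-- ===== CLAIM (what is proved, stated in full; the proofs are below) =====
def Claim_equal_etl : Prop := ∀ (str : String) (onlyNUM : Bool), Dom_etl str onlyNUM → Spec_etl str onlyNUM (etl str onlyNUM)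

-- ===== LEMMAS AND PROOFS =====

-- a single-character global replace acts independently on every character
lemma replace_go_single (a b : Char) :
    ∀ (l : List Char) (fuel : Nat) (acc : List Char), l.length ≤ fuel →
      PySem.Chars.replace.go [a] [b] fuel l acc
        = acc.reverse ++ l.map (fun c => if c = a then b else c) := by
  intro l
  induction l with
  | nil =>
    intro fuel acc _
    cases fuel <;> simp [PySem.Chars.replace.go]
  | cons c t ih =>
    intro fuel acc hle
    cases fuel with
    | zero => simp at hle
    | succ f =>
      have ht : t.length ≤ f := by simpa using hle
      by_cases hc : c = a
      · subst hc
        have hpre : List.isPrefixOf [c] (c :: t) = true := by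
          simp [List.isPrefixOf]
        rw [PySem.Chars.replace.go]
        simp only [hpre, if_true]
        show PySem.Chars.replace.go [c] [b] f t ([b].reverse ++ acc) = _
        rw [ih f _ ht]
        simp
      · have hpre : List.isPrefixOf [a] (c :: t) = false := by
          simp only [List.isPrefixOf, List.isPrefixOf_nil_left, Bool.and_true,
            beq_eq_false_iff_ne, ne_eq]
          exact fun h => hc h.symm
        rw [PySem.Chars.replace.go]
        simp only [hpre, Bool.false_eq_true, if_false]
        rw [ih f _ ht]
        simp [hc]

lemma replace_single (a b : Char) (l : List Char) :
    PySem.Chars.replace l [a] [b] = l.map (fun c => if c = a then b else c) := by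
  rw [PySem.Chars.replace]
  simp only [List.isEmpty_cons, Bool.false_eq_true, if_false]
  simpa using replace_go_single a b l l.length [] le_rfl

-- a fold of single-character Str.replace passes is a map of the composed substitution
lemma foldl_replace_toList (ds : List Char) (ns : String) (n : Char) (hns : ns.toList = [n])
    (s : String) :
    (ds.foldl (fun s d => PySem.Str.replace s (String.ofList [d]) ns) s).toList
      = s.toList.map (fun c => ds.foldl (fun c d => if c = d then n else c) c) := by
  induction ds generalizing s with
  | nil => simp
  | cons d ds ih =>
    simp only [List.foldl_cons]
    rw [ih]
    have h1 : (PySem.Str.replace s (String.ofList [d]) ns).toList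
        = s.toList.map (fun c => if c = d then n else c) := by
      rw [PySem.Str.toList_replace, String.toList_ofList, hns]
      exact replace_single d n s.toList
    rw [h1, List.map_map]
    rfl

-- nested maps fused into one map of the composed substitution (function arguments
-- kept as variables so the instantiation is purely syntactic)
lemma map4_fuse (f1 f2 f3 f4 : Char → Char) (l : List Char) :
    (((l.map f1).map f2).map f3).map f4 = l.map (fun c => f4 (f3 (f2 (f1 c)))) := by
  induction l with
  | nil => rfl
  | cons x xs ih => simp only [List.map_cons, ih]

-- per-character agreement of A's branch chains with B's staged substitutions,
-- checked for every lowercase-fixed character code the domain admits (< 127);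
-- the string was lowercased first, so only those characters occur
set_option maxRecDepth 8000 in
lemma etl_char_full : ∀ n ∈ List.range 127,
    PySem.Chars.lowerChar (Char.ofNat n) = Char.ofNat n →
    (if 'a' ≤ Char.ofNat n ∧ Char.ofNat n ≤ 'z' then 'A'
     else if '0' ≤ Char.ofNat n ∧ Char.ofNat n ≤ '9' then 'N'
     else if Char.ofNat n ∈ [',', '-', '_'] then 'T'
     else 'C') =
    (if List.foldl (fun c d => if c = d then 'T' else c)
          (List.foldl (fun c d => if c = d then 'N' else c)
            (List.foldl (fun c d => if c = d then 'A' else c) (Char.ofNat n)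
              "abcdefghijklmnopqrstuvwxyz".toList)
            "0123456789".toList)
          ",-_".toList ∈ ['A', 'N', 'T'] then
       List.foldl (fun c d => if c = d then 'T' else c)
          (List.foldl (fun c d => if c = d then 'N' else c)
            (List.foldl (fun c d => if c = d then 'A' else c) (Char.ofNat n)
              "abcdefghijklmnopqrstuvwxyz".toList)
            "0123456789".toList)
          ",-_".toList
     else 'C') := by
  decide

set_option maxRecDepth 8000 in
lemma etl_char_num : ∀ n ∈ List.range 127,
    (if '0' ≤ Char.ofNat n ∧ Char.ofNat n ≤ '9' then 'N' else Char.ofNat n) =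
    List.foldl (fun c d => if c = d then 'N' else c) (Char.ofNat n) "0123456789".toList := by
  decide

set_option maxRecDepth 4000 in
lemma lowerChar_fixed : ∀ n ∈ List.range 127,
    PySem.Chars.lowerChar (PySem.Chars.lowerChar (Char.ofNat n)) = PySem.Chars.lowerChar (Char.ofNat n) := by
  decide

set_option maxRecDepth 4000 in
lemma dom_lowerChar_range : ∀ n ∈ List.range 127, pvDomChar (Char.ofNat n) = true →
    pvDomChar (PySem.Chars.lowerChar (Char.ofNat n)) = true := by
  decide

lemma etl_foldl_map (f : Char → Char) (l : List Char) (acc : List Char) :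
    l.foldl (fun acc c => acc ++ [f c]) acc = acc ++ l.map f := by
  induction l generalizing acc with
  | nil => simp
  | cons x xs ih => simp [List.foldl_cons, ih]

-- every character of the lowercased string is a lowercase-fixed domain character
lemma lower_chars_ok (str : String) (hdom : pvDomStr str = true) :
    ∀ c ∈ (PySem.Str.lower str).toList,
      c.toNat < 127 ∧ PySem.Chars.lowerChar c = c := by
  intro c hc
  rw [PySem.Str.toList_lower] at hc
  unfold PySem.Chars.lower at hc
  obtain ⟨c0, hc0, rfl⟩ := List.mem_map.mp hc
  have h0 : pvDomChar c0 = true := List.all_eq_true.mp hdom c0 hc0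
  have hlt0 : c0.toNat < 127 := by
    simp [pvDomChar] at h0
    omega
  have hfix := lowerChar_fixed c0.toNat (List.mem_range.mpr hlt0)
  rw [Char.ofNat_toNat] at hfix
  have hd := dom_lowerChar_range c0.toNat (List.mem_range.mpr hlt0)
  rw [Char.ofNat_toNat] at hd
  have h1 : pvDomChar (PySem.Chars.lowerChar c0) = true := hd h0
  have hlt1 : (PySem.Chars.lowerChar c0).toNat < 127 := by
    simp [pvDomChar] at h1
    omega
  exact ⟨hlt1, hfix⟩

-- ===== VERDICT (by name: the statement is the Claim_ definition above) =====
set_option maxRecDepth 16000 in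
theorem etl_spec : Claim_equal_etl := by
  intro str onlyNUM hdom
  unfold Spec_etl etl etl_alt
  by_cases hs : str = ""
  · subst hs
    cases onlyNUM <;> decide
  · simp only [if_neg hs]
    have hok := lower_chars_ok str hdom
    cases onlyNUM with
    | false =>
      simp only [Bool.not_false, Bool.false_eq_true, if_false, if_true]
      rw [← String.toList_inj]
      rw [String.toList_ofList, String.toList_ofList]
      rw [foldl_replace_toList _ "T" 'T' (by decide),
          foldl_replace_toList _ "N" 'N' (by decide),
          foldl_replace_toList _ "A" 'A' (by decide)]
      rw [map4_fuse]
      have hA : ((PySem.Str.lower str).toList.foldl (fun acc c =>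
          if 'a' ≤ c ∧ c ≤ 'z' then acc ++ ['A']
          else if '0' ≤ c ∧ c ≤ '9' then acc ++ ['N']
          else if c ∈ [',', '-', '_'] then acc ++ ['T']
          else acc ++ ['C']) []) =
          (PySem.Str.lower str).toList.map (fun c =>
            if 'a' ≤ c ∧ c ≤ 'z' then 'A'
            else if '0' ≤ c ∧ c ≤ '9' then 'N'
            else if c ∈ [',', '-', '_'] then 'T'
            else 'C') := by
        have := etl_foldl_map (fun c =>
            if 'a' ≤ c ∧ c ≤ 'z' then 'A'
            else if '0' ≤ c ∧ c ≤ '9' then 'N'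
            else if c ∈ [',', '-', '_'] then 'T'
            else 'C') (PySem.Str.lower str).toList []
        rw [List.nil_append] at this
        rw [← this]
        congr 1
        funext acc c
        split_ifs <;> rfl
      rw [hA]
      apply List.map_congr_left
      intro c hc
      obtain ⟨hlt, hfix⟩ := hok c hc
      have := etl_char_full c.toNat (List.mem_range.mpr hlt)
      rw [Char.ofNat_toNat] at this
      exact this hfix
    | true =>
      simp only [Bool.not_true, Bool.false_eq_true, if_false, if_true]
      rw [← String.toList_inj, String.toList_ofList]
      rw [foldl_replace_toList _ "N" 'N' (by decide)]
      have hA : ((PySem.Str.lower str).toList.foldl (fun acc c =>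
          if '0' ≤ c ∧ c ≤ '9' then acc ++ ['N'] else acc ++ [c]) []) =
          (PySem.Str.lower str).toList.map (fun c =>
            if '0' ≤ c ∧ c ≤ '9' then 'N' else c) := by
        have := etl_foldl_map (fun c => if '0' ≤ c ∧ c ≤ '9' then 'N' else c)
          (PySem.Str.lower str).toList []
        rw [List.nil_append] at this
        rw [← this]
        congr 1
        funext acc c
        split_ifs <;> rfl
      rw [hA]
      apply List.map_congr_left
      intro c hc
      obtain ⟨hlt, _⟩ := hok c hc
      have := etl_char_num c.toNat (List.mem_range.mpr hlt)
      rw [Char.ofNat_toNat] at this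
      exact this
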